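-- pv_equiv track=rewrite | github.com/wjb771465-netizen/Quillen | desk/formula.py | _gaps
-- ===== SOURCE A (Python) =====
-- def _merge_spans(spans: list[tuple[int, int]]) -> list[tuple[int, int]]:
--     if not spans:
--         return []
--     spans = sorted(spans)
--     out = [spans[0]]
--     for a, b in spans[1:]:
--         la, lb = out[-1]
--         if a <= lb:
--             out[-1] = (la, max(lb, b))
--         else:
--             out.append((a, b))
--     return out
--
-- def _gaps(text: str, occupied: list[tuple[int, int]]) -> list[tuple[int, int]]:
--     if not occupied:
--         return [(0, len(text))]
--     occ = _merge_spans(occupied)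
--     gaps = []
--     pos = 0
--     for a, b in occ:
--         if pos < a:
--             gaps.append((pos, a))
--         pos = max(pos, b)
--     if pos < len(text):
--         gaps.append((pos, len(text)))
--     return gaps
-- ===== SOURCE B (Python) =====
-- def _gaps(text: str, occupied: list[tuple[int, int]]) -> list[tuple[int, int]]:
--     # Table formulation: build an explicit prefix-maximum table of the covered
--     # frontier, then derive gaps by zipping span starts against the table.
--     if not occupied:
--         return [(0, len(text))]
--     spans = sorted(occupied)
--     ends = [0]
--     for _, b in spans:
--         ends.append(max(ends[-1], b))
--     gaps = [(p, a) for p, (a, _) in zip(ends, spans) if p < a]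
--     if ends[-1] < len(text):
--         gaps.append((ends[-1], len(text)))
--     return gaps
-- ===== Notes on version B (the rewrite author's own statement) =====
-- stated objective: alternative
-- what changed: B drops A's interval-merge pre-pass and mutable sweep entirely: it builds an explicit prefix-maximum table of covered frontiers over the sorted spans, then derives the gaps by zipping span starts against that table with a filter comprehension.
import Mathlib
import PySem

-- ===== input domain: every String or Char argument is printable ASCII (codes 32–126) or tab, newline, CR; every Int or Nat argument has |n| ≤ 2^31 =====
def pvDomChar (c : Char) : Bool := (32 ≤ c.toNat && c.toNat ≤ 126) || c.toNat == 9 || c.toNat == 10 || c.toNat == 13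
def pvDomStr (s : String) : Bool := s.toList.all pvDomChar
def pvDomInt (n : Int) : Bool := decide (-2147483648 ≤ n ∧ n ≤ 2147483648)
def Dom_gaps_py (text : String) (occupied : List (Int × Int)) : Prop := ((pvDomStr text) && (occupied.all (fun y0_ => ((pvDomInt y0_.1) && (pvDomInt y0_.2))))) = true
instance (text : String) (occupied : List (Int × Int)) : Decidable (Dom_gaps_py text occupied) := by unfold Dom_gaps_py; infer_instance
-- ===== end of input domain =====

-- B replaces A's merge-then-sweep (mutable pos/last state) with staged passes: an explicit
-- prefix-maximum table of covered frontiers, then a zip/filter over starts; return values proved equal on all inputs.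

-- ===== PORT A =====
-- _merge_spans: sort, then fold maintaining `out`, mutating out[-1] or appending
def merge_spans (spans : List (Int × Int)) : List (Int × Int) :=
  if spans.isEmpty then [] else
  match PySem.List.sorted2 spans (·.1) (·.2) with
  | [] => []
  | s0 :: rest =>
    rest.foldl (fun out ab =>
      let last := out.getLastD (0, 0)   -- out[-1]; out is never empty
      if ab.1 ≤ last.2 then out.dropLast ++ [(last.1, max last.2 ab.2)]
      else out ++ [ab]) [s0]

def gaps_py (text : String) (occupied : List (Int × Int)) : List (Int × Int) :=
  if occupied.isEmpty then [(0, PySem.Str.len text)] else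
  let occ := merge_spans occupied
  let st := occ.foldl (fun (st : List (Int × Int) × Int) ab =>
      ((if st.2 < ab.1 then st.1 ++ [(st.2, ab.1)] else st.1), max st.2 ab.2)) ([], 0)
  if st.2 < PySem.Str.len text then st.1 ++ [(st.2, PySem.Str.len text)] else st.1

-- ===== PORT B =====
-- staged: sort; build the prefix-maximum table `ends`; zip/filter starts against it; trailing gap from ends[-1]
def gaps_py_alt (text : String) (occupied : List (Int × Int)) : List (Int × Int) :=
  if occupied.isEmpty then [(0, PySem.Str.len text)] else
  let spans := PySem.List.sorted2 occupied (·.1) (·.2)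
  let ends := spans.foldl (fun e ab => e ++ [max (e.getLastD 0) ab.2]) [0]
  let gaps := (ends.zip spans).filterMap
      (fun pe => if pe.1 < pe.2.1 then some (pe.1, pe.2.1) else none)
  if ends.getLastD 0 < PySem.Str.len text then gaps ++ [(ends.getLastD 0, PySem.Str.len text)]
  else gaps

-- ===== PRECONDITION & SPEC =====
def Spec_gaps_py (text : String) (occupied : List (Int × Int)) (out : List (Int × Int)) : Prop := out = gaps_py_alt text occupied
instance (text : String) (occupied : List (Int × Int)) (out : List (Int × Int)) : Decidable (Spec_gaps_py text occupied out) := by unfold Spec_gaps_py; infer_instance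

-- ===== CLAIM (what is proved, stated in full; the proofs are below) =====
def Claim_equal_gaps_py : Prop := ∀ (text : String) (occupied : List (Int × Int)), Dom_gaps_py text occupied → Spec_gaps_py text occupied (gaps_py text occupied)

-- ===== LEMMAS AND PROOFS =====

/-- A's gap-walk step over the merged list. -/
def gstep (st : List (Int × Int) × Int) (ab : Int × Int) : List (Int × Int) × Int :=
  ((if st.2 < ab.1 then st.1 ++ [(st.2, ab.1)] else st.1), max st.2 ab.2)

/-- Recursive characterisation of A's merge loop: the pending last span plus emitted prefix. -/
def mergeAux : List (Int × Int) → (Int × Int) → List (Int × Int)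
  | [], last => [last]
  | ab :: t, last =>
    if ab.1 ≤ last.2 then mergeAux t (last.1, max last.2 ab.2)
    else last :: mergeAux t ab

theorem merge_foldl_eq_mergeAux (t : List (Int × Int)) :
    ∀ (init : List (Int × Int)) (last : Int × Int),
    t.foldl (fun out ab =>
      let l := out.getLastD (0, 0)
      if ab.1 ≤ l.2 then out.dropLast ++ [(l.1, max l.2 ab.2)]
      else out ++ [ab]) (init ++ [last]) = init ++ mergeAux t last := by
  induction t with
  | nil => intro init last; simp [mergeAux]
  | cons ab t ih =>
    intro init last
    simp only [List.foldl_cons, mergeAux]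
    have h1 : (init ++ [last]).getLastD (0, 0) = last := by
      simp [List.getLastD_eq_getLast?]
    have h2 : (init ++ [last]).dropLast = init := by simp
    rw [h1, h2]
    by_cases h : ab.1 ≤ last.2
    · rw [if_pos h, if_pos h, ih]
    · rw [if_neg h, if_neg h]
      rw [List.append_assoc, ← List.singleton_append, ← List.append_assoc, ih]
      simp

/-- Walking the merged list with gstep is walking the raw list, for ANY list and start state. -/
theorem foldl_gstep_mergeAux (t : List (Int × Int)) :
    ∀ (last : Int × Int) (st : List (Int × Int) × Int),
    (mergeAux t last).foldl gstep st = t.foldl gstep (gstep st last) := by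
  induction t with
  | nil => intro last st; simp [mergeAux]
  | cons ab t ih =>
    intro last st
    simp only [mergeAux]
    by_cases h : ab.1 ≤ last.2
    · rw [if_pos h, ih, List.foldl_cons]
      have : gstep (gstep st last) ab = gstep st (last.1, max last.2 ab.2) := by
        simp only [gstep]
        rw [if_neg (show ¬ (max st.2 last.2 < ab.1) by omega)]
        rw [Prod.mk.injEq]
        exact ⟨rfl, by omega⟩
      rw [this]
    · rw [if_neg h, List.foldl_cons, ih, List.foldl_cons]

/-- Prefix-maximum tail: the table B builds after its leading 0. -/
def pmax : List (Int × Int) → Int → List Int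
  | [], _ => []
  | ab :: t, p => (max p ab.2) :: pmax t (max p ab.2)

/-- The final frontier. -/
def pfin : List (Int × Int) → Int → Int
  | [], p => p
  | ab :: t, p => pfin t (max p ab.2)

/-- The gap list, recursively. -/
def gz : List (Int × Int) → Int → List (Int × Int)
  | [], _ => []
  | ab :: t, p => (if p < ab.1 then [(p, ab.1)] else []) ++ gz t (max p ab.2)

theorem ends_foldl_eq_pmax (xs : List (Int × Int)) :
    ∀ (init : List Int), init ≠ [] →
    xs.foldl (fun e ab => e ++ [max (e.getLastD 0) ab.2]) init
      = init ++ pmax xs (init.getLastD 0) := by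
  induction xs with
  | nil => intro init _; simp [pmax]
  | cons ab t ih =>
    intro init hne
    simp only [List.foldl_cons, pmax]
    have h1 : (init ++ [max (init.getLastD 0) ab.2]).getLastD 0 = max (init.getLastD 0) ab.2 := by
      simp [List.getLastD_eq_getLast?]
    have := ih (init ++ [max (init.getLastD 0) ab.2]) (by simp)
    rw [this, h1]
    simp

theorem pmax_getLastD (xs : List (Int × Int)) :
    ∀ (p : Int), (pmax xs p).getLastD p = pfin xs p := by
  induction xs with
  | nil => intro p; simp [pmax, pfin]
  | cons ab t ih =>
    intro p
    simp only [pmax, pfin, List.getLastD_cons]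
    exact ih (max p ab.2)

theorem zip_filterMap_eq_gz (xs : List (Int × Int)) :
    ∀ (p : Int),
    ((p :: pmax xs p).zip xs).filterMap
        (fun pe => if pe.1 < pe.2.1 then some (pe.1, pe.2.1) else none)
      = gz xs p := by
  induction xs with
  | nil => intro p; simp [gz]
  | cons ab t ih =>
    intro p
    simp only [pmax, List.zip_cons_cons, List.filterMap_cons, gz]
    by_cases h : p < ab.1
    · rw [if_pos h, if_pos h, ih]; rfl
    · rw [if_neg h, if_neg h, ih]; rfl

theorem foldl_gstep_eq (xs : List (Int × Int)) :
    ∀ (acc : List (Int × Int)) (p : Int),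
    xs.foldl gstep (acc, p) = (acc ++ gz xs p, pfin xs p) := by
  induction xs with
  | nil => intro acc p; simp [gz, pfin]
  | cons ab t ih =>
    intro acc p
    simp only [List.foldl_cons, gstep, gz, pfin]
    by_cases h : p < ab.1
    · rw [if_pos h, if_pos h, ih]; simp
    · rw [if_neg h, if_neg h, ih]; simp

theorem gaps_py_spec : Claim_equal_gaps_py := by
  intro text occupied _
  unfold Spec_gaps_py gaps_py gaps_py_alt merge_spans
  by_cases he : occupied.isEmpty
  · simp [he]
  · simp only [he, if_false, Bool.false_eq_true]
    cases hs : PySem.List.sorted2 occupied (·.1) (·.2) with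
    | nil =>
      simp
    | cons s0 rest =>
      -- A side: merged list walked with gstep = gz/pfin over the raw sorted list
      have hm : rest.foldl (fun out ab =>
          let l := out.getLastD (0, 0)
          if ab.1 ≤ l.2 then out.dropLast ++ [(l.1, max l.2 ab.2)]
          else out ++ [ab]) [s0] = mergeAux rest s0 := by
        simpa using merge_foldl_eq_mergeAux rest [] s0
      have hA : (mergeAux rest s0).foldl
          (fun (st : List (Int × Int) × Int) ab =>
            ((if st.2 < ab.1 then st.1 ++ [(st.2, ab.1)] else st.1), max st.2 ab.2)) ([], 0)
          = (gz (s0 :: rest) 0, pfin (s0 :: rest) 0) := by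
        have h1 : (mergeAux rest s0).foldl gstep ([], 0)
            = (s0 :: rest).foldl gstep ([], 0) := by
          rw [foldl_gstep_mergeAux, List.foldl_cons]
        have h2 := foldl_gstep_eq (s0 :: rest) [] 0
        simp only [List.nil_append] at h2
        exact (by exact h1.trans h2 :
          (mergeAux rest s0).foldl gstep ([], 0) = (gz (s0 :: rest) 0, pfin (s0 :: rest) 0))
      -- B side: the ends table is 0 :: pmax, its last is pfin, the zip/filter is gz
      have hE : (s0 :: rest).foldl (fun e ab => e ++ [max (e.getLastD 0) ab.2]) [0]
          = 0 :: pmax (s0 :: rest) 0 := by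
        simpa using ends_foldl_eq_pmax (s0 :: rest) [0] (by simp)
      have hL : (0 :: pmax (s0 :: rest) 0).getLastD 0 = pfin (s0 :: rest) 0 := by
        rw [List.getLastD_cons]; exact pmax_getLastD (s0 :: rest) 0
      simp only [hm, hA, hE, hL, zip_filterMap_eq_gz]
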